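-- pv_equiv track=rewrite | github.com/blegloannec/CodeProblems | Codeforces/878A.py | simpl
-- ===== SOURCE A (Python) =====
-- def simu(P,i):
--     for c,x in P:
--         if c=='&':
--             i &= x
--         elif c=='|':
--             i |= x
--         else:
--             i ^= x
--     return i
--
-- def simpl(P):
--     out0,out1 = simu(P,0),simu(P,1023)
--     A,O,X = 1023,0,0
--     for i in range(10):
--         B01 = (out0>>i)&1,(out1>>i)&1
--         if B01==(0,0):
--             A ^= 1<<i
--         elif B01==(1,0):
--             X |= 1<<i
--         elif B01==(1,1):
--             O |= 1<<i
--     return A,O,X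
-- ===== SOURCE B (Python) =====
-- def simu(P, i):
--     for c, x in P:
--         if c == '&':
--             i &= x
--         elif c == '|':
--             i |= x
--         else:
--             i ^= x
--     return i
--
--
-- def simpl(P):
--     out0, out1 = simu(P, 0), simu(P, 1023)
--     return (out0 | out1) & 1023, (out0 & out1) & 1023, (out0 & ~out1) & 1023
-- ===== Notes on version B (the rewrite author's own statement) =====
-- stated objective: simpler
-- what changed: B replaces A's 10-iteration per-bit classification loop (shift, test, xor/or accumulate) by three closed-form masked bitwise expressions on the two simulation outputs: (out0|out1)&1023, (out0&out1)&1023, (out0&~out1)&1023.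
import Mathlib
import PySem

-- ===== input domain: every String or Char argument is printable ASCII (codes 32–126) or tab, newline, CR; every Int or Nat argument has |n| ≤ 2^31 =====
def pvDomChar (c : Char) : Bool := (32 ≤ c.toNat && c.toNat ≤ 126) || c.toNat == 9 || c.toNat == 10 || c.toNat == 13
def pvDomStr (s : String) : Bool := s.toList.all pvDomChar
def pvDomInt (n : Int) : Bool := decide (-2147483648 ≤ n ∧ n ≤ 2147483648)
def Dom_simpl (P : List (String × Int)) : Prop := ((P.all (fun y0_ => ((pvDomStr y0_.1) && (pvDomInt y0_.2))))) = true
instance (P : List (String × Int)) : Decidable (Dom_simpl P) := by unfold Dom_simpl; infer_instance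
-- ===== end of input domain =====

-- B replaces A's 10-iteration per-bit classification loop by three closed-form masked
-- bitwise expressions on the two simulation outputs (objective: simpler; same asymptotic cost).

-- ===== PORT A =====
-- module helper simu, shared by A and B exactly as in the Python module
def simu (P : List (String × Int)) (i : Int) : Int :=
  P.foldl (fun i cx =>
    if cx.1 = "&" then PySem.Int.band i cx.2
    else if cx.1 = "|" then PySem.Int.bor i cx.2
    else PySem.Int.bxor i cx.2) i

-- the body of A's `for i in range(10)` loop, one step of the fold
def simplStep (out0 out1 : Int) (s : Int × Int × Int) (i : Nat) : Int × Int × Int :=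
  let b01 := (PySem.Int.band (out0 >>> i) 1, PySem.Int.band (out1 >>> i) 1)
  if b01 = ((0 : Int), (0 : Int)) then (PySem.Int.bxor s.1 ((1 : Int) <<< i), s.2.1, s.2.2)
  else if b01 = ((1 : Int), (0 : Int)) then (s.1, s.2.1, PySem.Int.bor s.2.2 ((1 : Int) <<< i))
  else if b01 = ((1 : Int), (1 : Int)) then (s.1, PySem.Int.bor s.2.1 ((1 : Int) <<< i), s.2.2)
  else s

def simpl (P : List (String × Int)) : Int × Int × Int :=
  let out0 := simu P 0
  let out1 := simu P 1023
  (List.range 10).foldl (simplStep out0 out1) (1023, 0, 0)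

-- ===== PORT B =====
def simpl_alt (P : List (String × Int)) : Int × Int × Int :=
  let out0 := simu P 0
  let out1 := simu P 1023
  (PySem.Int.band (PySem.Int.bor out0 out1) 1023,
   PySem.Int.band (PySem.Int.band out0 out1) 1023,
   PySem.Int.band (PySem.Int.band out0 (Int.not out1)) 1023)

-- ===== PRECONDITION & SPEC =====
def Spec_simpl (P : List (String × Int)) (out : Int × Int × Int) : Prop := out = simpl_alt P
instance (P : List (String × Int)) (out : Int × Int × Int) : Decidable (Spec_simpl P out) := by unfold Spec_simpl; infer_instance

-- ===== CLAIM (what is proved, stated in full; the proofs are below) =====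
def Claim_equal_simpl : Prop := ∀ (P : List (String × Int)), Dom_simpl P → Spec_simpl P (simpl P)

-- ===== LEMMAS AND PROOFS =====

theorem disj_add (x : Nat) : ∀ y : Nat, x &&& y = 0 → x + y = (x ||| y) := by
  induction x using Nat.strong_induction_on with
  | _ x ih =>
    intro y h
    rcases Nat.eq_zero_or_pos x with hx | hx
    · simp [hx]
    have hdiv : x / 2 + y / 2 = (x / 2 ||| y / 2) := by
      apply ih (x / 2) (by omega)
      have := congrArg (· / 2) h
      simpa [Nat.and_div_two] using this
    have hb := Nat.testBit_and x y 0
    rw [h, Nat.testBit_zero, Nat.testBit_zero, Nat.testBit_zero] at hb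
    have hand : (0 % 2 = 1) ↔ ((x % 2 = 1) ∧ (y % 2 = 1)) := by
      simpa using congrArg (· = true) hb
    have hob := Nat.testBit_or x y 0
    rw [Nat.testBit_zero, Nat.testBit_zero, Nat.testBit_zero] at hob
    have hpar : ((x ||| y) % 2 = 1) ↔ ((x % 2 = 1) ∨ (y % 2 = 1)) := by
      simpa using congrArg (· = true) hob
    have h2 : (x ||| y) / 2 = x / 2 ||| y / 2 := Nat.or_div_two
    have hx2 := Nat.div_add_mod x 2
    have hy2 := Nat.div_add_mod y 2
    have ho2 := Nat.div_add_mod (x ||| y) 2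
    have mo := Nat.mod_lt (x ||| y) (show 0 < 2 by norm_num)
    omega

theorem and_or_ldiff (m n : Nat) : (m &&& n) ||| m.ldiff n = m := by
  apply Nat.eq_of_testBit_eq
  intro i
  simp [Nat.testBit_or, Nat.testBit_and, Nat.testBit_ldiff]
  cases m.testBit i <;> cases n.testBit i <;> simp

theorem and_and_ldiff (m n : Nat) : (m &&& n) &&& m.ldiff n = 0 := by
  apply Nat.eq_of_testBit_eq
  intro i
  simp [Nat.testBit_and, Nat.testBit_ldiff]
  cases m.testBit i <;> cases n.testBit i <;> simp

theorem sub_and_eq_ldiff (m n : Nat) : m - (m &&& n) = m.ldiff n := by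
  have h := disj_add (m &&& n) (m.ldiff n) (and_and_ldiff m n)
  rw [and_or_ldiff] at h
  omega

theorem band_ofNat_ofNat (m n : Nat) :
    PySem.Int.band (Int.ofNat m) (Int.ofNat n) = Int.ofNat (m &&& n) := by
  simp [PySem.Int.band]

theorem band_ofNat_negSucc (m n : Nat) :
    PySem.Int.band (Int.ofNat m) (Int.negSucc n) = Int.ofNat (m.ldiff n) := by
  simp [PySem.Int.band, ← sub_and_eq_ldiff]

theorem band_negSucc_ofNat (m n : Nat) :
    PySem.Int.band (Int.negSucc m) (Int.ofNat n) = Int.ofNat (n.ldiff m) := by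
  simp [PySem.Int.band, ← sub_and_eq_ldiff]

theorem band_negSucc_negSucc (m n : Nat) :
    PySem.Int.band (Int.negSucc m) (Int.negSucc n) = Int.negSucc (m ||| n) := by
  simp [PySem.Int.band, Int.negSucc_eq]
  omega

theorem bor_ofNat_ofNat (m n : Nat) :
    PySem.Int.bor (Int.ofNat m) (Int.ofNat n) = Int.ofNat (m ||| n) := by
  simp [PySem.Int.bor]

theorem bor_ofNat_negSucc (m n : Nat) :
    PySem.Int.bor (Int.ofNat m) (Int.negSucc n) = Int.negSucc (n.ldiff m) := by
  simp [PySem.Int.bor, ← sub_and_eq_ldiff, Int.negSucc_eq]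
  omega

theorem bor_negSucc_ofNat (m n : Nat) :
    PySem.Int.bor (Int.negSucc m) (Int.ofNat n) = Int.negSucc (m.ldiff n) := by
  simp [PySem.Int.bor, ← sub_and_eq_ldiff, Int.negSucc_eq]
  omega

theorem bor_negSucc_negSucc (m n : Nat) :
    PySem.Int.bor (Int.negSucc m) (Int.negSucc n) = Int.negSucc (m &&& n) := by
  simp [PySem.Int.bor, Int.negSucc_eq]
  omega

theorem bxor_ofNat_ofNat (m n : Nat) :
    PySem.Int.bxor (Int.ofNat m) (Int.ofNat n) = Int.ofNat (m ^^^ n) := by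
  simp [PySem.Int.bxor]

theorem bxor_ofNat_negSucc (m n : Nat) :
    PySem.Int.bxor (Int.ofNat m) (Int.negSucc n) = Int.negSucc (m ^^^ n) := by
  simp [PySem.Int.bxor, Int.negSucc_eq]
  omega

theorem bxor_negSucc_ofNat (m n : Nat) :
    PySem.Int.bxor (Int.negSucc m) (Int.ofNat n) = Int.negSucc (m ^^^ n) := by
  simp [PySem.Int.bxor, Int.negSucc_eq]
  omega

theorem bxor_negSucc_negSucc (m n : Nat) :
    PySem.Int.bxor (Int.negSucc m) (Int.negSucc n) = Int.ofNat (m ^^^ n) := by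
  simp [PySem.Int.bxor, Int.negSucc_eq]
  split_ifs <;> omega

theorem testBit_band (a b : Int) (i : Nat) :
    (PySem.Int.band a b).testBit i = (a.testBit i && b.testBit i) := by
  cases a with
  | ofNat m => cases b with
    | ofNat n => rw [band_ofNat_ofNat]; simp [Int.testBit, Nat.testBit_and]
    | negSucc n => rw [band_ofNat_negSucc]; simp [Int.testBit, Nat.testBit_ldiff]
  | negSucc m => cases b with
    | ofNat n =>
      rw [band_negSucc_ofNat]; simp [Int.testBit, Nat.testBit_ldiff]
      cases m.testBit i <;> cases n.testBit i <;> simp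
    | negSucc n => rw [band_negSucc_negSucc]; simp [Int.testBit, Nat.testBit_or]

theorem testBit_bor (a b : Int) (i : Nat) :
    (PySem.Int.bor a b).testBit i = (a.testBit i || b.testBit i) := by
  cases a with
  | ofNat m => cases b with
    | ofNat n => rw [bor_ofNat_ofNat]; simp [Int.testBit, Nat.testBit_or]
    | negSucc n =>
      rw [bor_ofNat_negSucc]; simp [Int.testBit, Nat.testBit_ldiff, Bool.or_comm]
  | negSucc m => cases b with
    | ofNat n =>
      rw [bor_negSucc_ofNat]; simp [Int.testBit, Nat.testBit_ldiff]
    | negSucc n =>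
      rw [bor_negSucc_negSucc]; simp [Int.testBit, Nat.testBit_and]

theorem testBit_bxor (a b : Int) (i : Nat) :
    (PySem.Int.bxor a b).testBit i = (xor (a.testBit i) (b.testBit i)) := by
  cases a with
  | ofNat m => cases b with
    | ofNat n => rw [bxor_ofNat_ofNat]; simp [Int.testBit, Nat.testBit_xor]
    | negSucc n =>
      rw [bxor_ofNat_negSucc]; simp [Int.testBit, Nat.testBit_xor]
  | negSucc m => cases b with
    | ofNat n =>
      rw [bxor_negSucc_ofNat]; simp [Int.testBit, Nat.testBit_xor]
    | negSucc n =>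
      rw [bxor_negSucc_negSucc]; simp [Int.testBit, Nat.testBit_xor]

theorem testBit_not (a : Int) (i : Nat) :
    (Int.not a).testBit i = !(a.testBit i) := by
  cases a <;> simp [Int.not, Int.testBit]

theorem shiftRight_ofNat' (m i : Nat) : (Int.ofNat m) >>> i = Int.ofNat (m >>> i) := rfl

theorem shiftRight_negSucc' (m i : Nat) : (Int.negSucc m) >>> i = Int.negSucc (m >>> i) := rfl

theorem testBit_shiftRight (a : Int) (i j : Nat) :
    (a >>> i).testBit j = a.testBit (i + j) := by
  cases a with
  | ofNat m => rw [shiftRight_ofNat']; simp [Int.testBit, Nat.testBit_shiftRight]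
  | negSucc m => rw [shiftRight_negSucc']; simp [Int.testBit, Nat.testBit_shiftRight]

theorem int_ext_of_nonneg (x y : Int) (hx : 0 ≤ x) (hy : 0 ≤ y)
    (h : ∀ i, x.testBit i = y.testBit i) : x = y := by
  cases x with
  | ofNat m =>
    cases y with
    | ofNat n => exact congrArg Int.ofNat (Nat.eq_of_testBit_eq fun i => h i)
    | negSucc n => exact absurd hy (by simp [Int.negSucc_eq]; omega)
  | negSucc m => exact absurd hx (by simp [Int.negSucc_eq]; omega)

theorem band_one_testBit (x : Int) : PySem.Int.band x 1 = if x.testBit 0 then 1 else 0 := by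
  cases x with
  | ofNat m =>
    rw [show (1 : Int) = Int.ofNat 1 from rfl, band_ofNat_ofNat]
    rw [Nat.and_one_is_mod]
    simp [Int.testBit, Nat.testBit_zero]
    omega
  | negSucc m =>
    rw [show (1 : Int) = Int.ofNat 1 from rfl, band_negSucc_ofNat]
    rw [← sub_and_eq_ldiff, Nat.and_comm, Nat.and_one_is_mod]
    simp [Int.testBit, Nat.testBit_zero]
    omega

theorem band_bit_atom (x : Int) (i : Nat) :
    PySem.Int.band (x >>> i) 1 = if x.testBit i then 1 else 0 := by
  rw [band_one_testBit, testBit_shiftRight]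
  simp

theorem bxor_nonneg' (x y : Int) (hx : 0 ≤ x) (hy : 0 ≤ y) : 0 ≤ PySem.Int.bxor x y := by
  cases x with
  | ofNat m =>
    cases y with
    | ofNat n => rw [bxor_ofNat_ofNat]; exact Int.natCast_nonneg _
    | negSucc n => exact absurd hy (by simp [Int.negSucc_eq]; omega)
  | negSucc m => exact absurd hx (by simp [Int.negSucc_eq]; omega)

theorem bor_nonneg' (x y : Int) (hx : 0 ≤ x) (hy : 0 ≤ y) : 0 ≤ PySem.Int.bor x y := by
  cases x with
  | ofNat m =>
    cases y with
    | ofNat n => rw [bor_ofNat_ofNat]; exact Int.natCast_nonneg _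
    | negSucc n => exact absurd hy (by simp [Int.negSucc_eq]; omega)
  | negSucc m => exact absurd hx (by simp [Int.negSucc_eq]; omega)

theorem band_nonneg_right (a : Int) (n : Nat) : 0 ≤ PySem.Int.band a (Int.ofNat n) := by
  cases a with
  | ofNat m => rw [band_ofNat_ofNat]; exact Int.natCast_nonneg _
  | negSucc m => rw [band_negSucc_ofNat]; exact Int.natCast_nonneg _

theorem testBit_one_shiftLeft (n j : Nat) :
    ((1 : Int) <<< n).testBit j = decide (n = j) := by
  rw [show (1 : Int) <<< n = Int.ofNat (1 <<< n) from rfl]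
  simp [Int.testBit, Nat.one_shiftLeft, Nat.testBit_two_pow]

theorem testBit_1023 (j : Nat) : (1023 : Int).testBit j = decide (j < 10) := by
  rw [show (1023 : Int) = Int.ofNat (2 ^ 10 - 1) from rfl]
  rw [show ((Int.ofNat (2 ^ 10 - 1)).testBit j) = ((2 ^ 10 - 1 : Nat).testBit j) from rfl]
  rw [Nat.testBit_two_pow_sub_one]

theorem loop_inv (a b : Int) (n : Nat) (hn : n ≤ 10) :
    let s := (List.range n).foldl (simplStep a b) (1023, 0, 0)
    (0 ≤ s.1 ∧ ∀ j, s.1.testBit j =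
        (decide (j < 10) && !(decide (j < n) && !(a.testBit j || b.testBit j)))) ∧
    (0 ≤ s.2.1 ∧ ∀ j, s.2.1.testBit j = (decide (j < n) && (a.testBit j && b.testBit j))) ∧
    (0 ≤ s.2.2 ∧ ∀ j, s.2.2.testBit j = (decide (j < n) && (a.testBit j && !b.testBit j))) := by
  induction n with
  | zero =>
    refine ⟨⟨by norm_num, fun j => ?_⟩, ⟨by norm_num, fun j => ?_⟩, ⟨by norm_num, fun j => ?_⟩⟩
    · simp [testBit_1023]
    · simp [Int.testBit]
    · simp [Int.testBit]
  | succ n ih =>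
    have ih := ih (by omega)
    simp only [List.range_succ, List.foldl_append, List.foldl_cons, List.foldl_nil] at *
    set s := (List.range n).foldl (simplStep a b) (1023, 0, 0) with hs
    obtain ⟨⟨hA0, hA⟩, ⟨hO0, hO⟩, ⟨hX0, hX⟩⟩ := ih
    have hn10 : n < 10 := by omega
    cases ha : a.testBit n <;> cases hb : b.testBit n <;>
      simp only [simplStep, band_bit_atom, ha, hb, if_true, if_false, Bool.false_eq_true] <;>
      norm_num <;>
      refine ⟨⟨?_, fun j => ?_⟩, ⟨?_, fun j => ?_⟩, ⟨?_, fun j => ?_⟩⟩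
    all_goals
      first
      | exact hA0
      | exact hO0
      | exact hX0
      | exact bxor_nonneg' _ _ hA0 (Int.natCast_nonneg _)
      | exact bor_nonneg' _ _ hO0 (Int.natCast_nonneg _)
      | exact bor_nonneg' _ _ hX0 (Int.natCast_nonneg _)
      | (simp only [testBit_bxor, testBit_bor, testBit_one_shiftLeft, hA, hO, hX]
         rcases Nat.lt_trichotomy j n with h | h | h
         · simp [show j < n from h, show j ≤ n by omega, show ¬ n = j by omega,
                 show j < 10 by omega]
         · subst h
           simp [ha, hb, hn10]
         · simp [show ¬ j < n by omega, show ¬ j ≤ n by omega, show ¬ n = j by omega])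

theorem loop_closed_form (a b : Int) :
    (List.range 10).foldl (simplStep a b) (1023, 0, 0) =
      (PySem.Int.band (PySem.Int.bor a b) 1023,
       PySem.Int.band (PySem.Int.band a b) 1023,
       PySem.Int.band (PySem.Int.band a (Int.not b)) 1023) := by
  obtain ⟨⟨hA0, hA⟩, ⟨hO0, hO⟩, ⟨hX0, hX⟩⟩ := loop_inv a b 10 (by omega)
  have h1023 : (1023 : Int) = Int.ofNat 1023 := rfl
  refine Prod.ext ?_ (Prod.ext ?_ ?_)
  · apply int_ext_of_nonneg _ _ hA0 (by rw [h1023]; exact band_nonneg_right _ _)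
    intro j
    rw [hA, testBit_band, testBit_bor, testBit_1023]
    cases a.testBit j <;> cases b.testBit j <;> cases hj : decide (j < 10) <;> simp [hj]
  · apply int_ext_of_nonneg _ _ hO0 (by rw [h1023]; exact band_nonneg_right _ _)
    intro j
    rw [hO, testBit_band, testBit_band, testBit_1023]
    cases a.testBit j <;> cases b.testBit j <;> cases hj : decide (j < 10) <;> simp [hj]
  · apply int_ext_of_nonneg _ _ hX0 (by rw [h1023]; exact band_nonneg_right _ _)
    intro j
    rw [hX, testBit_band, testBit_band, testBit_not, testBit_1023]
    cases a.testBit j <;> cases b.testBit j <;> cases hj : decide (j < 10) <;> simp [hj]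

theorem simpl_eq_alt (P : List (String × Int)) : simpl P = simpl_alt P := by
  simp only [simpl, simpl_alt]
  exact loop_closed_form _ _

-- ===== VERDICT (by name: the statement is the Claim_ definition above) =====
theorem simpl_spec : Claim_equal_simpl := by
  intro P _
  unfold Spec_simpl
  exact simpl_eq_alt P
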